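-- pv_equiv track=rewrite | github.com/pypi-data/pypi-mirror-95 | packages/bradk/bradk-0.11.3.tar.gz/bradk-0.11.3/bradk/utils.py | Find_Characters_Pattern
-- ===== SOURCE A (Python) =====
-- def Find_Characters_Pattern(string, DICT_CH_TO_PATTERN = {
--     'a':'A', 'b':'A', 'c':'A', 'd':'A', 'e':'A', 'f':'A', 'g':'A', 'h':'A', 'i':'A', 'j':'A', 'k':'A', 'l':'A', 'm':'A',
--     'n':'A', 'o':'A', 'p':'A', 'q':'A', 'r':'A', 's':'A', 't':'A', 'u':'A', 'v':'A', 'w':'A', 'x':'A', 'y':'A', 'z':'A',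
--     '0':'D', '1':'D', '2':'D', '3':'D', '4':'D', '5':'D', '6':'D', '7':'D', '8':'D', '9':'D',
-- }):
--     dkeys = DICT_CH_TO_PATTERN.keys()
--     pt = ''.join([DICT_CH_TO_PATTERN[c] if c in dkeys else c for c in string.lower()])
--     return ''.join([c for i, c in enumerate(pt) if (i==0) | ((i != 0) & (pt[i-1] != pt[i]))])
-- ===== SOURCE B (Python) =====
-- def Find_Characters_Pattern(string, DICT_CH_TO_PATTERN = {
--     'a':'A', 'b':'A', 'c':'A', 'd':'A', 'e':'A', 'f':'A', 'g':'A', 'h':'A', 'i':'A', 'j':'A', 'k':'A', 'l':'A', 'm':'A',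
--     'n':'A', 'o':'A', 'p':'A', 'q':'A', 'r':'A', 's':'A', 't':'A', 'u':'A', 'v':'A', 'w':'A', 'x':'A', 'y':'A', 'z':'A',
--     '0':'D', '1':'D', '2':'D', '3':'D', '4':'D', '5':'D', '6':'D', '7':'D', '8':'D', '9':'D',
-- }):
--     # Divide and conquer: collapse each half independently, then merge the two
--     # collapsed halves, dropping the right half's head when it equals the left
--     # half's last character (runs never survive a collapsed half, so one check
--     # at the seam suffices).
--     def collapse(s):
--         if len(s) <= 1:
--             return s
--         mid = len(s) // 2
--         L = collapse(s[:mid])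
--         R = collapse(s[mid:])
--         if L and R and L[-1] == R[0]:
--             return L + R[1:]
--         return L + R
--     mapped = [ch for c in string.lower() for ch in DICT_CH_TO_PATTERN.get(c, c)]
--     return ''.join(collapse(mapped))
-- ===== Notes on version B (the rewrite author's own statement) =====
-- stated objective: alternative
-- what changed: B replaces A's single left-to-right pass that keeps pt[i] when pt[i-1] != pt[i] by a divide-and-conquer collapse: the mapped character list is split in half, each half collapsed recursively, and the collapsed halves concatenated with one duplicate check at the seam.
import Mathlib
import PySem

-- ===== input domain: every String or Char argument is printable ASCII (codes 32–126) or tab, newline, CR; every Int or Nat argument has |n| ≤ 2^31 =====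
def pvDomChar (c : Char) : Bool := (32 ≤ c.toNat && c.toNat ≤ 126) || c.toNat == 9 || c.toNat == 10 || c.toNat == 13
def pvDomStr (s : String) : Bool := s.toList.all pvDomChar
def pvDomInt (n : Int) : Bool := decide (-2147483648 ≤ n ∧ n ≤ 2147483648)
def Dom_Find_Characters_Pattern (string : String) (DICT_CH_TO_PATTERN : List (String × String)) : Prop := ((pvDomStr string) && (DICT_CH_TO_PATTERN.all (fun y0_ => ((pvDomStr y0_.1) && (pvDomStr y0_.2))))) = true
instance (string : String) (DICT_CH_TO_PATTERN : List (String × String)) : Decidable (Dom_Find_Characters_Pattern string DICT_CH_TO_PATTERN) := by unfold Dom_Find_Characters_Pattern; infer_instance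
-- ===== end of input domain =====

-- B replaces A's single left-to-right pass (index comparison pt[i-1] != pt[i]) by a divide-and-conquer
-- collapse: each half is collapsed recursively and the halves are merged with one check at the seam
-- (objective: alternative — a different algorithm, similar cost).

-- ===== PORT A =====
def Find_Characters_Pattern (string : String) (DICT_CH_TO_PATTERN : List (String × String)) : String :=
  let d := PySem.Dict.ofList DICT_CH_TO_PATTERN
  -- pt = ''.join([DICT_CH_TO_PATTERN[c] if c in dkeys else c for c in string.lower()])
  let pt := PySem.Str.join "" ((PySem.Str.lower string).toList.map (fun c =>
      if d.contains (String.mk [c]) then (d.get? (String.mk [c])).getD "" else String.mk [c]))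
  let ptl := pt.toList
  -- ''.join([c for i, c in enumerate(pt) if (i==0) | ((i != 0) & (pt[i-1] != pt[i]))])
  -- (both sides of | and & are evaluated, as in Python's bitwise operators; pt[i-1] is pyGet?)
  String.mk (((PySem.List.enumerate ptl).filter (fun ic =>
      (decide (ic.1 = 0)) || ((decide (ic.1 ≠ 0)) && (PySem.List.pyGet? ptl (ic.1 - 1) != some ic.2)))).map (·.2))

-- ===== PORT B =====
-- Source B's seam merge: drop R's head when it equals L's last character
def pvMerge (L R : List Char) : List Char :=
  if L ≠ [] ∧ R ≠ [] ∧ L.getLast? = R.head? then L ++ R.tail else L ++ R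

-- Source B's recursive collapse; s[:mid] / s[mid:] with 0 ≤ mid ≤ len are exactly take/drop
def pvCollapseDC (l : List Char) : List Char :=
  if _h : l.length ≤ 1 then l
  else
    pvMerge (pvCollapseDC (l.take (l.length / 2))) (pvCollapseDC (l.drop (l.length / 2)))
termination_by l.length
decreasing_by
  · simp only [List.length_take]; omega
  · simp only [List.length_drop]; omega

def Find_Characters_Pattern_alt (string : String) (DICT_CH_TO_PATTERN : List (String × String)) : String :=
  let d := PySem.Dict.ofList DICT_CH_TO_PATTERN
  -- mapped = [ch for c in string.lower() for ch in DICT_CH_TO_PATTERN.get(c, c)]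
  let mapped := (PySem.Str.lower string).toList.flatMap (fun c =>
      (d.getD (String.mk [c]) (String.mk [c])).toList)
  String.mk (pvCollapseDC mapped)

-- ===== PRECONDITION & SPEC =====
def Spec_Find_Characters_Pattern (string : String) (DICT_CH_TO_PATTERN : List (String × String)) (out : String) : Prop := out = Find_Characters_Pattern_alt string DICT_CH_TO_PATTERN
instance (string : String) (DICT_CH_TO_PATTERN : List (String × String)) (out : String) : Decidable (Spec_Find_Characters_Pattern string DICT_CH_TO_PATTERN out) := by unfold Spec_Find_Characters_Pattern; infer_instance

-- ===== CLAIM =====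
def Claim_equal_Find_Characters_Pattern : Prop := ∀ (string : String) (DICT_CH_TO_PATTERN : List (String × String)), Dom_Find_Characters_Pattern string DICT_CH_TO_PATTERN → Spec_Find_Characters_Pattern string DICT_CH_TO_PATTERN (Find_Characters_Pattern string DICT_CH_TO_PATTERN)

-- ===== LEMMAS AND PROOFS =====

-- ''.join(parts) flattens the character lists of the parts
theorem pv_join_empty_toList (l : List String) :
    (PySem.Str.join "" l).toList = l.flatMap String.toList := by
  induction l with
  | nil => simp [PySem.Str.join, PySem.Chars.join_nil]
  | cons a t ih =>
    cases t with
    | nil => simp [PySem.Str.join, PySem.Chars.join_singleton]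
    | cons b r =>
      simp only [PySem.Str.toList_join, List.map_cons] at ih ⊢
      simp only [show ("" : String).toList = [] from rfl] at ih ⊢
      rw [PySem.Chars.join_cons_cons]
      simp [ih]

-- A's membership-guarded lookup is B's .get(c, c)
theorem pv_branch_eq (d : PySem.Dict String String) (k v : String) :
    (if d.contains k then (d.get? k).getD "" else v) = d.getD k v := by
  rw [PySem.Dict.getD_eq_get?_getD, PySem.Dict.contains_eq_isSome_get?]
  cases h : d.get? k <;> simp [h]

-- previous-character-carrying dedup: the common form both programs reduce to
def pvDedup : Option Char → List Char → List Char
  | _, [] => []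
  | prev, c :: t => if prev == some c then pvDedup (some c) t else c :: pvDedup (some c) t

-- A's enumerate/filter over a suffix of the full list, with at least one character before it
theorem pv_aux (suf : List Char) : ∀ (pre l : List Char), l = pre ++ suf → pre ≠ [] →
    ((PySem.List.enumerate suf (pre.length : Int)).filter (fun ic =>
      (decide (ic.1 = 0)) || ((decide (ic.1 ≠ 0)) && (PySem.List.pyGet? l (ic.1 - 1) != some ic.2)))).map (·.2)
    = pvDedup pre.getLast? suf := by
  induction suf with
  | nil => intro pre l _ _; simp [PySem.List.enumerate_nil, pvDedup]
  | cons c t ih =>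
    intro pre l hl hpre
    have hlen : 0 < pre.length := List.length_pos_of_ne_nil hpre
    have hcast : ((pre.length : Int) - 1) = ((pre.length - 1 : Nat) : Int) := by omega
    have hget : PySem.List.pyGet? l ((pre.length : Int) - 1) = pre.getLast? := by
      rw [hcast, PySem.List.pyGet?_natCast, hl, List.getElem?_append_left (by omega),
        ← List.getLast?_eq_getElem?]
    have IH := ih (pre ++ [c]) l (by simp [hl]) (by simp)
    rw [show (pre ++ [c]).getLast? = some c by simp] at IH
    rw [show (((pre ++ [c]).length : Int)) = (pre.length : Int) + 1 by simp] at IH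
    rw [PySem.List.enumerate_cons, List.filter_cons]
    by_cases hc : pre.getLast? = some c
    · have hcond : ¬ (((decide ((pre.length:Int) = 0)) || ((decide ((pre.length:Int) ≠ 0)) && (PySem.List.pyGet? l ((pre.length:Int) - 1) != some c))) = true) := by
        rw [hget]; simp [hc]; omega
      rw [if_neg hcond, IH]
      simp [pvDedup, hc]
    · have hcond : (((decide ((pre.length:Int) = 0)) || ((decide ((pre.length:Int) ≠ 0)) && (PySem.List.pyGet? l ((pre.length:Int) - 1) != some c))) = true) := by
        rw [hget]; simp [hc]; tauto
      rw [if_pos hcond, List.map_cons, IH]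
      simp [pvDedup, hc]

theorem pv_filter_eq_dedup (l : List Char) :
    ((PySem.List.enumerate l 0).filter (fun ic =>
      (decide (ic.1 = 0)) || ((decide (ic.1 ≠ 0)) && (PySem.List.pyGet? l (ic.1 - 1) != some ic.2)))).map (·.2)
      = pvDedup none l := by
  cases l with
  | nil => simp [PySem.List.enumerate_nil, pvDedup]
  | cons c t =>
    have IH := pv_aux t [c] (c::t) (by simp) (by simp)
    rw [show (([c] : List Char).getLast?) = some c by simp] at IH
    rw [show ((([c] : List Char).length : Int)) = (0 : Int) + 1 by simp] at IH
    rw [PySem.List.enumerate_cons, List.filter_cons]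
    have hcond : (((decide ((0:Int) = 0)) || ((decide ((0:Int) ≠ 0)) && (PySem.List.pyGet? (c::t) ((0:Int) - 1) != some c))) = true) := by simp
    rw [if_pos hcond, List.map_cons, IH]
    simp [pvDedup]

-- unfolding equations for pvDedup
theorem pvDedup_none_cons (a : Char) (t : List Char) :
    pvDedup none (a :: t) = a :: pvDedup (some a) t := by simp [pvDedup]

theorem pvDedup_cons_eq (a : Char) (t : List Char) :
    pvDedup (some a) (a :: t) = pvDedup (some a) t := by simp [pvDedup]

theorem pvDedup_cons_ne (a b : Char) (t : List Char) (h : a ≠ b) :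
    pvDedup (some a) (b :: t) = b :: pvDedup (some b) t := by simp [pvDedup, h]

-- if the dedup of t after prev = b is empty, every element of t is b
theorem pv_dedup_nil_getLast (r : List Char) : ∀ b, pvDedup (some b) r = [] →
    (b :: r).getLast (by simp) = b := by
  induction r with
  | nil => intro b _; simp
  | cons c r' ih =>
    intro b h
    by_cases hbc : b = c
    · subst hbc
      rw [pvDedup_cons_eq] at h
      rw [List.getLast_cons (by simp)]
      exact ih b h
    · rw [pvDedup_cons_ne _ _ _ hbc] at h
      simp at h

-- the last character survives dedup
theorem pv_dedup_getLast? (t : List Char) : ∀ a,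
    (a :: pvDedup (some a) t).getLast? = some ((a :: t).getLast (by simp)) := by
  induction t with
  | nil => intro a; simp [pvDedup]
  | cons b r ih =>
    intro a
    rw [List.getLast_cons (List.cons_ne_nil b r)]
    by_cases hab : a = b
    · subst hab
      rw [pvDedup_cons_eq]
      cases hd : pvDedup (some a) r with
      | nil =>
        have hlast := pv_dedup_nil_getLast r a hd
        simp [hlast]
      | cons x xs =>
        have IH := ih a
        rw [hd] at IH
        rw [List.getLast?_cons_cons]
        rw [List.getLast?_cons_cons] at IH
        exact IH
    · rw [pvDedup_cons_ne _ _ _ hab, List.getLast?_cons_cons]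
      exact ih b

-- dedup splits over append: the right part is deduped against the left part's last character
theorem pv_dedup_append (t : List Char) : ∀ (l2 : List Char) (a : Char),
    pvDedup (some a) (t ++ l2) = pvDedup (some a) t ++ pvDedup (some ((a :: t).getLast (by simp))) l2 := by
  induction t with
  | nil => intro l2 a; simp [pvDedup]
  | cons b r ih =>
    intro l2 a
    rw [List.cons_append,
      show ((a :: b :: r).getLast (by simp)) = ((b :: r).getLast (by simp)) from
        List.getLast_cons (by simp)]
    by_cases hab : a = b
    · subst hab
      rw [pvDedup_cons_eq, pvDedup_cons_eq]
      exact ih l2 a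
    · rw [pvDedup_cons_ne _ _ _ hab, pvDedup_cons_ne _ _ _ hab, ih l2 b, List.cons_append]

-- dedup of a concatenation is the merge of the two dedups
theorem pv_dedup_merge (l1 l2 : List Char) :
    pvDedup none (l1 ++ l2) = pvMerge (pvDedup none l1) (pvDedup none l2) := by
  cases l1 with
  | nil => simp [pvMerge, pvDedup]
  | cons a t =>
    rw [List.cons_append, pvDedup_none_cons, pvDedup_none_cons, pv_dedup_append t l2 a]
    cases l2 with
    | nil => simp [pvMerge, pvDedup]
    | cons b s =>
      rw [pvDedup_none_cons]
      by_cases hwb : (a :: t).getLast (by simp) = b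
      · rw [pvMerge, if_pos ⟨by simp, by simp, by rw [pv_dedup_getLast? t a, hwb]; rfl⟩]
        rw [hwb, pvDedup_cons_eq]
        rfl
      · have hne : (a :: pvDedup (some a) t).getLast? ≠ (b :: pvDedup (some b) s).head? := by
          rw [pv_dedup_getLast? t a]
          simpa using hwb
        rw [pvMerge, if_neg (by tauto)]
        rw [pvDedup_cons_ne _ _ _ hwb]
        rfl

-- the divide-and-conquer collapse computes the left-to-right dedup
theorem pv_dc_eq_dedup (l : List Char) : pvCollapseDC l = pvDedup none l := by
  induction l using pvCollapseDC.induct with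
  | case1 l h =>
    rw [pvCollapseDC, dif_pos h]
    match l, h with
    | [], _ => rfl
    | [c], _ => simp [pvDedup]
  | case2 l h ih1 ih2 =>
    rw [pvCollapseDC, dif_neg h, ih1, ih2, ← pv_dedup_merge, List.take_append_drop]

-- ===== VERDICT (by name: the statement is the Claim_ definition above) =====
theorem Find_Characters_Pattern_spec : Claim_equal_Find_Characters_Pattern := by
  intro s dl _
  show Find_Characters_Pattern s dl = Find_Characters_Pattern_alt s dl
  simp only [Find_Characters_Pattern, Find_Characters_Pattern_alt]
  rw [show (PySem.Str.join "" ((PySem.Str.lower s).toList.map (fun c =>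
      if (PySem.Dict.ofList dl).contains (String.mk [c]) then ((PySem.Dict.ofList dl).get? (String.mk [c])).getD "" else String.mk [c]))).toList
      = (PySem.Str.lower s).toList.flatMap (fun c => ((PySem.Dict.ofList dl).getD (String.mk [c]) (String.mk [c])).toList) from by
    rw [pv_join_empty_toList, List.flatMap_map]
    simp only [pv_branch_eq]]
  rw [pv_filter_eq_dedup, ← pv_dc_eq_dedup]
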